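-- pv_equiv track=rewrite | github.com/haiyLiu/Multi-source-Knowledge-Enhancement-Framework | small_experiments/long_tail/long_tail.py | load_split_data
-- ===== SOURCE A (Python) =====
-- def load_split_data(data, entity_frequency):
--     '''
--     data: dict()
--     entity_frequency: dict()
--     根据实体频率数据entity_frequency，筛选出实体在test中的三元组，以及对应的answer
--     '''
--     new_test_forward = list()
--     new_test_backward = list()
--     for key, value in entity_frequency.items():
--         for llm_key, llm_answer in data.items():
--             parts = llm_key.split("|")
--             #预测尾实体，那么尾实体应该是长尾
--             if len(parts) > 2 and parts[2] == key:
--                 new_test_forward.append(llm_answer)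
--             #预测头实体，那么头实体应该是长尾
--             if len(parts) > 2 and parts[0] == key:
--                 new_test_backward.append(llm_answer)
--     return new_test_forward, new_test_backward
-- ===== SOURCE B (Python) =====
-- def load_split_data(data, entity_frequency):
--     # Index answers by the triple's tail (parts[2]) and head (parts[0]) once,
--     # then collect per frequency key: O(E+D) instead of O(E*D).
--     tail_idx = {}
--     head_idx = {}
--     for llm_key, llm_answer in data.items():
--         parts = llm_key.split("|")
--         if len(parts) > 2:
--             tail_idx.setdefault(parts[2], []).append(llm_answer)
--             head_idx.setdefault(parts[0], []).append(llm_answer)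
--     new_test_forward = []
--     new_test_backward = []
--     for key in entity_frequency:
--         new_test_forward.extend(tail_idx.get(key, []))
--         new_test_backward.extend(head_idx.get(key, []))
--     return new_test_forward, new_test_backward
-- ===== Notes on version B (the rewrite author's own statement) =====
-- stated objective: faster
-- what changed: B builds head/tail dict indexes of data in one pass and then extends the result lists per frequency key, replacing A's nested scan of data for every entity_frequency key.
import Mathlib
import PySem

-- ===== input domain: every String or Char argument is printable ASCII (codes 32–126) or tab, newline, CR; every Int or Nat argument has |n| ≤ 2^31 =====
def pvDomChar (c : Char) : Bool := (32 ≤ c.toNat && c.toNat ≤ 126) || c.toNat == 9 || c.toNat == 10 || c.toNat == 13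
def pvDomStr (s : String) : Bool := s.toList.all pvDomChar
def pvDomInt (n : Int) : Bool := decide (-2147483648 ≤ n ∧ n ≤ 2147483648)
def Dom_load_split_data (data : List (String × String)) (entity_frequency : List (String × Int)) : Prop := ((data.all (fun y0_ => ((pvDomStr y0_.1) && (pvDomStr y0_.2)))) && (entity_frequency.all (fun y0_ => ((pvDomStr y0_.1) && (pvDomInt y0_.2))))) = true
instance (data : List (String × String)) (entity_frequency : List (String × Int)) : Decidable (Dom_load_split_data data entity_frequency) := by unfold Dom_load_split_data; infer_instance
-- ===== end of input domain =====

-- ===== PORT A =====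
-- B indexes data by tail/head entity once and extends per frequency key (asymptotically fewer scans than A's nested loops).
def load_split_data (data : List (String × String)) (entity_frequency : List (String × Int)) : List String × List String :=
  entity_frequency.foldl (fun acc kv =>
    data.foldl (fun acc2 p =>
      let parts := (PySem.Str.split? p.1 "|").getD []
      let acc3 := if 2 < parts.length ∧ parts.getD 2 "" = kv.1 then (acc2.1 ++ [p.2], acc2.2) else acc2
      if 2 < parts.length ∧ parts.getD 0 "" = kv.1 then (acc3.1, acc3.2 ++ [p.2]) else acc3)
      acc)
    ([], [])

-- ===== PORT B =====
def load_split_data_alt (data : List (String × String)) (entity_frequency : List (String × Int)) : List String × List String :=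
  let idx := data.foldl (fun (ds : PySem.Dict String (List String) × PySem.Dict String (List String)) p =>
    let parts := (PySem.Str.split? p.1 "|").getD []
    if 2 < parts.length then
      (ds.1.modify (parts.getD 2 "") [] (· ++ [p.2]), ds.2.modify (parts.getD 0 "") [] (· ++ [p.2]))
    else ds) (PySem.Dict.empty, PySem.Dict.empty)
  entity_frequency.foldl (fun acc kv => (acc.1 ++ idx.1.getD kv.1 [], acc.2 ++ idx.2.getD kv.1 [])) ([], [])

-- ===== PRECONDITION & SPEC =====
def Spec_load_split_data (data : List (String × String)) (entity_frequency : List (String × Int)) (out : List String × List String) : Prop := out = load_split_data_alt data entity_frequency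
instance (data : List (String × String)) (entity_frequency : List (String × Int)) (out : List String × List String) : Decidable (Spec_load_split_data data entity_frequency out) := by unfold Spec_load_split_data; infer_instance

-- ===== CLAIM (what is proved, stated in full; the proofs are below) =====
def Claim_equal_load_split_data : Prop := ∀ (data : List (String × String)) (entity_frequency : List (String × Int)), Dom_load_split_data data entity_frequency → Spec_load_split_data data entity_frequency (load_split_data data entity_frequency)

-- ===== LEMMAS AND PROOFS =====

-- answers whose triple's tail (resp. head) entity is k, in data order
def fwdSel (k : String) (data : List (String × String)) : List String :=
  data.filterMap (fun p =>
    let parts := (PySem.Str.split? p.1 "|").getD []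
    if 2 < parts.length ∧ parts.getD 2 "" = k then some p.2 else none)

def bwdSel (k : String) (data : List (String × String)) : List String :=
  data.filterMap (fun p =>
    let parts := (PySem.Str.split? p.1 "|").getD []
    if 2 < parts.length ∧ parts.getD 0 "" = k then some p.2 else none)

lemma inner_loop_eq (k : String) (data : List (String × String)) (acc : List String × List String) :
    data.foldl (fun acc2 p =>
      let parts := (PySem.Str.split? p.1 "|").getD []
      let acc3 := if 2 < parts.length ∧ parts.getD 2 "" = k then (acc2.1 ++ [p.2], acc2.2) else acc2
      if 2 < parts.length ∧ parts.getD 0 "" = k then (acc3.1, acc3.2 ++ [p.2]) else acc3) acc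
    = (acc.1 ++ fwdSel k data, acc.2 ++ bwdSel k data) := by
  induction data generalizing acc with
  | nil => simp [fwdSel, bwdSel]
  | cons p rest ih =>
    simp only [List.foldl_cons, ih, fwdSel, bwdSel, List.filterMap_cons]
    split_ifs <;> simp_all

lemma idx_getD (data : List (String × String)) (k : String)
    (ds : PySem.Dict String (List String) × PySem.Dict String (List String)) :
    ((data.foldl (fun ds p =>
        let parts := (PySem.Str.split? p.1 "|").getD []
        if 2 < parts.length then
          (ds.1.modify (parts.getD 2 "") [] (· ++ [p.2]), ds.2.modify (parts.getD 0 "") [] (· ++ [p.2]))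
        else ds) ds).1.getD k []
      = ds.1.getD k [] ++ fwdSel k data)
    ∧ ((data.foldl (fun ds p =>
        let parts := (PySem.Str.split? p.1 "|").getD []
        if 2 < parts.length then
          (ds.1.modify (parts.getD 2 "") [] (· ++ [p.2]), ds.2.modify (parts.getD 0 "") [] (· ++ [p.2]))
        else ds) ds).2.getD k []
      = ds.2.getD k [] ++ bwdSel k data) := by
  induction data generalizing ds with
  | nil => simp [fwdSel, bwdSel]
  | cons p rest ih =>
    simp only [List.foldl_cons, fwdSel, bwdSel, List.filterMap_cons]
    by_cases hl : 2 < ((PySem.Str.split? p.1 "|").getD []).length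
    · simp only [hl, if_true, true_and]
      rcases ih ((fun ds => ((ds.1.modify (((PySem.Str.split? p.1 "|").getD []).getD 2 "") [] (· ++ [p.2]),
          ds.2.modify (((PySem.Str.split? p.1 "|").getD []).getD 0 "") [] (· ++ [p.2])))) ds) with ⟨h1, h2⟩
      constructor
      · rw [h1]
        by_cases hk : ((PySem.Str.split? p.1 "|").getD []).getD 2 "" = k
        · subst hk; simp [PySem.Dict.getD_modify_self, fwdSel]
        · rw [PySem.Dict.getD_modify_of_ne]
          · simp only [List.getD] at hk
            simp [hk, fwdSel]
          · exact fun h => hk h.symm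
      · rw [h2]
        by_cases hk : ((PySem.Str.split? p.1 "|").getD []).getD 0 "" = k
        · subst hk; simp [PySem.Dict.getD_modify_self, bwdSel]
        · rw [PySem.Dict.getD_modify_of_ne]
          · simp only [List.getD] at hk
            simp [hk, bwdSel]
          · exact fun h => hk h.symm
    · simp only [hl, if_false, false_and]
      rcases ih ds with ⟨h1, h2⟩
      exact ⟨by rw [h1]; simp [fwdSel], by rw [h2]; simp [bwdSel]⟩

-- ===== VERDICT (by name: the statement is the Claim_ definition above) =====
theorem load_split_data_spec : Claim_equal_load_split_data := by
  intro data ef _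
  unfold Spec_load_split_data load_split_data load_split_data_alt
  simp only []
  congr 1
  funext acc kv
  rw [inner_loop_eq]
  rcases idx_getD data kv.1 (PySem.Dict.empty, PySem.Dict.empty) with ⟨h1, h2⟩
  rw [h1, h2]
  rfl
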